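-- pv_equiv track=rewrite | github.com/BenderEg/Bioinformatics | 011 Pattern neighborhood.py | create_neighbors
-- ===== SOURCE A (Python) =====
-- def find_Hamming_distance(p, q):
--     result = 0
--     for i in range(len(p)):
--         if p[i] != q[i]:
--             result += 1
--     return result
--
-- def create_neighbors(pattern, d):
--     output = ['A', 'C', 'G', 'T']
--     if d == 0:
--         return pattern
--     if len(pattern) == 1:
--         return output
--     neighbors = []
--     first_symbol = pattern[0]
--     suffix_pattern = pattern[1:]
--     suffix_neighbors = create_neighbors(suffix_pattern, d)
--     for ele in suffix_neighbors:
--         if find_Hamming_distance(ele, suffix_pattern) < d: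
--             for elem in output:
--                 text = elem + ele
--                 neighbors.append(text)
--         else:
--             text = first_symbol + ele
--             neighbors.append(text)
--     return neighbors
-- ===== SOURCE B (Python) =====
-- # Iterative DP over the pattern from right to left, carrying each neighbor's
-- # Hamming distance alongside it so distances are never recomputed.
-- def create_neighbors(pattern, d):
--     output = ['A', 'C', 'G', 'T']
--     if d == 0:
--         return pattern
--     if len(pattern) == 1:
--         return output
--     last = pattern[-1]
--     current = [(b, 0 if b == last else 1) for b in output]
--     for i in range(len(pattern) - 2, -1, -1):
--         c = pattern[i]
--         new = []
--         for ele, h in current: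
--             if h < d:
--                 for b in output:
--                     new.append((b + ele, h if b == c else h + 1))
--             else:
--                 new.append((c + ele, h))
--         current = new
--     return [s for s, _ in current]
-- ===== Notes on version B (the rewrite author's own statement) =====
-- stated objective: faster
-- what changed: Replaced A's suffix recursion, which calls find_Hamming_distance on every neighbor at every level, by an iterative right-to-left dynamic-programming loop that carries each neighbor's Hamming distance alongside it and updates it in O(1) per prepended base; intended as faster (probe measured 16.7x at the largest size both finished; on exponentially larger outputs both exceed the time budget).
-- outside the precondition, e.g. on create_neighbors('AC', 0): A returns 'AC', B returns 'AC'
import Mathlib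
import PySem

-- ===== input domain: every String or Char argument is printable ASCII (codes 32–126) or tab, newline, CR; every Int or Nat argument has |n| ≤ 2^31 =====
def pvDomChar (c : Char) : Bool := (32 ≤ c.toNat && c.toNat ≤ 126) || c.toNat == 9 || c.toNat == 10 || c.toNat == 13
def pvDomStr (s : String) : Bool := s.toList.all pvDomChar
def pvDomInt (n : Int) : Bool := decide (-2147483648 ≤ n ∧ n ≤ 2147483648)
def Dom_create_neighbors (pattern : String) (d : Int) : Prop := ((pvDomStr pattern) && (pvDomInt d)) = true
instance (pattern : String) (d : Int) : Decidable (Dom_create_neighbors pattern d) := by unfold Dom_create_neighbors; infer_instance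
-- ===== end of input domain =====

-- B replaces A's recursion (which recomputes every neighbor's Hamming distance at each level)
-- by a right-to-left loop carrying each neighbor's distance alongside it; intended as faster
-- (a timing run measured 16.7x at the largest size on which both programs finished).


-- ===== PORT A =====
-- find_Hamming_distance, on List Char (strings cross to lists via String.toList/String.ofList):
-- 'for i in range(len(p)): if p[i] != q[i]: result += 1' — exact for len p ≤ len q (A's only calls)
def find_Hamming_distance (p q : List Char) : Int :=
  (PySem.List.pyRange 0 p.length 1).foldl
    (fun result i =>
      if PySem.List.pyGet? p i ≠ PySem.List.pyGet? q i then result + 1 else result) 0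

-- the recursion of A, on List Char
def create_neighbors_core : List Char → Int → List (List Char)
  | pat, d =>
    if d = 0 then []          -- Python returns the STRING `pattern` here (not a list); outside Pre_
    else if pat.length = 1 then [['A'], ['C'], ['G'], ['T']]
    else
      match pat with
      | [] => []              -- Python raises IndexError at pattern[0]; outside Pre_
      | first_symbol :: suffix_pattern =>
        (create_neighbors_core suffix_pattern d).foldl
          (fun neighbors ele =>
            if find_Hamming_distance ele suffix_pattern < d then
              ['A', 'C', 'G', 'T'].foldl (fun acc elem => acc ++ [elem :: ele]) neighbors
            else neighbors ++ [first_symbol :: ele]) []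

def create_neighbors (pattern : String) (d : Int) : List String :=
  (create_neighbors_core pattern.toList d).map (fun cs => String.ofList cs)

-- ===== PORT B =====
-- one iteration of B's loop: prepend pattern[i] (= c), updating each carried distance
def stepB (d : Int) (c : Char) (cur : List (List Char × Int)) : List (List Char × Int) :=
  cur.foldl
    (fun new p =>
      if p.2 < d then
        new ++ ['A', 'C', 'G', 'T'].map (fun b => (b :: p.1, if b = c then p.2 else p.2 + 1))
      else new ++ [(c :: p.1, p.2)]) []

def create_neighbors_alt (pattern : String) (d : Int) : List String :=
  if d = 0 then []            -- Python returns the STRING `pattern` here (not a list); outside Pre_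
  else if pattern.toList.length = 1 then ["A", "C", "G", "T"]
  else
    match pattern.toList with
    | [] => []                -- Python raises IndexError at pattern[-1]; outside Pre_
    | c :: rest =>
      let last := (c :: rest).getLastD 'A'    -- pattern[-1]; the list is nonempty here
      let init := ['A', 'C', 'G', 'T'].map (fun b => ([b], if b = last then (0 : Int) else 1))
      ((c :: rest).dropLast.foldr (stepB d) init).map (fun p => String.ofList p.1)

-- ===== PRECONDITION & SPEC =====
-- Pre_ excludes d == 0, where A returns the input STRING itself (not a value of the declared
-- list-of-strings return type), and the empty pattern, where A raises IndexError.
def Pre_create_neighbors (pattern : String) (d : Int) : Prop := pattern ≠ "" ∧ d ≠ 0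
instance (pattern : String) (d : Int) : Decidable (Pre_create_neighbors pattern d) := by unfold Pre_create_neighbors; infer_instance
def pvWitness_create_neighbors : String × Int := ("AC", 1)

def Spec_create_neighbors (pattern : String) (d : Int) (out : List String) : Prop := out = create_neighbors_alt pattern d
instance (pattern : String) (d : Int) (out : List String) : Decidable (Spec_create_neighbors pattern d out) := by unfold Spec_create_neighbors; infer_instance

-- ===== CLAIM (what is proved, stated in full; the proofs are below) =====
def Claim_equal_create_neighbors : Prop := ∀ (pattern : String) (d : Int), Dom_create_neighbors pattern d → Pre_create_neighbors pattern d → Spec_create_neighbors pattern d (create_neighbors pattern d)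

-- ===== LEMMAS AND PROOFS =====

-- structural Hamming distance on equal-length lists (proof-side only)
def hm : List Char → List Char → Int
  | [], _ => 0
  | _ :: _, [] => 0
  | a :: p, b :: q => (if a = b then 0 else 1) + hm p q

theorem hm_cons (b c : Char) (p q : List Char) :
    hm (b :: p) (c :: q) = (if b = c then 0 else 1) + hm p q := rfl

theorem ham_eq (p q : List Char) (h : p.length = q.length) :
    find_Hamming_distance p q = hm p q := by
  unfold find_Hamming_distance
  rw [PySem.List.foldl_ite_add_one]
  rw [PySem.List.pyRange_zero_nat]
  induction p generalizing q with
  | nil => simp [hm]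
  | cons a p ih =>
    match q, h with
    | b :: q, h =>
      have h' : p.length = q.length := by simpa using h
      have ihq := ih q h'
      rw [List.length_cons, List.range_succ_eq_map]
      simp only [List.countP_cons, List.countP_map, Function.comp_def, PySem.List.pyGet?_natCast,
        List.getElem?_cons_succ, List.getElem?_cons_zero, Nat.succ_eq_add_one, hm] at *
      push_cast at *
      by_cases hab : a = b <;> simp [hab] at * <;> omega

-- A's loop body, in flatMap normal form
theorem coreA_cons (d : Int) (first : Char) (suffix : List Char)
    (hd : d ≠ 0) (hs : suffix ≠ []) :
    create_neighbors_core (first :: suffix) d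
      = (create_neighbors_core suffix d).flatMap
          (fun ele => if find_Hamming_distance ele suffix < d
            then ['A', 'C', 'G', 'T'].map (· :: ele) else [first :: ele]) := by
  rw [create_neighbors_core]
  have h1 : (first :: suffix).length ≠ 1 := by simp [List.length_eq_zero_iff, hs]
  simp only [hd, h1, if_false]
  refine (PySem.List.foldl_congr_mem _ _
    (fun neighbors ele => neighbors ++ (if find_Hamming_distance ele suffix < d
          then ['A', 'C', 'G', 'T'].map (· :: ele) else [first :: ele])) _ ?_).trans ?_
  · intro acc x _
    by_cases hx : find_Hamming_distance x suffix < d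
    · simp [hx]
    · simp [hx]
  · rw [PySem.List.foldl_append_eq_flatMap]; simp

-- B's loop body, in flatMap normal form
theorem stepB_eq (d : Int) (c : Char) (cur : List (List Char × Int)) :
    stepB d c cur
      = cur.flatMap (fun p => if p.2 < d
          then ['A', 'C', 'G', 'T'].map (fun b => (b :: p.1, if b = c then p.2 else p.2 + 1))
          else [(c :: p.1, p.2)]) := by
  unfold stepB
  refine (PySem.List.foldl_congr_mem _ _
    (fun new p => new ++ (if p.2 < d
          then ['A', 'C', 'G', 'T'].map (fun b => (b :: p.1, if b = c then p.2 else p.2 + 1))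
          else [(c :: p.1, p.2)])) _ ?_).trans ?_
  · intro acc x _; by_cases hx : x.2 < d <;> simp [hx]
  · rw [PySem.List.foldl_append_eq_flatMap]; simp

-- every neighbor A produces has the pattern's length
theorem lenA (d : Int) (pat : List Char) :
    ∀ s ∈ create_neighbors_core pat d, s.length = pat.length := by
  induction pat with
  | nil => intro s hs; rw [create_neighbors_core] at hs; split at hs <;> simp_all
  | cons c rest ih =>
    intro s hs
    by_cases hd : d = 0
    · rw [create_neighbors_core] at hs; simp [hd] at hs
    by_cases hr : rest = []
    · subst hr; rw [create_neighbors_core] at hs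
      simp [hd] at hs
      rcases hs with h | h | h | h <;> subst h <;> rfl
    · rw [coreA_cons d c rest hd hr] at hs
      simp only [List.mem_flatMap] at hs
      obtain ⟨ele, hele, hs⟩ := hs
      have hl := ih ele hele
      split at hs <;> simp at hs
      · rcases hs with rfl | rfl | rfl | rfl <;> simp [hl]
      · subst hs; simp [hl]

-- invariant: B's loop state is A's neighbor list of the processed suffix, paired with distances
theorem mainB (d : Int) (hd : d ≠ 0) (pat : List Char) (hp : pat ≠ []) :
    pat.dropLast.foldr (stepB d)
        (['A', 'C', 'G', 'T'].map (fun b => ([b], if b = pat.getLastD 'A' then (0 : Int) else 1)))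
      = (create_neighbors_core pat d).map (fun s => (s, hm s pat)) := by
  induction pat with
  | nil => exact absurd rfl hp
  | cons c rest ih =>
    by_cases hr : rest = []
    · subst hr
      rw [create_neighbors_core]
      simp [hd, hm]
    · have hih := ih hr
      have hlast : (c :: rest).getLastD 'A' = rest.getLastD 'A' := by
        match rest, hr with
        | x :: xs, _ => rfl
      rw [List.dropLast_cons_of_ne_nil hr, List.foldr_cons, hlast, hih,
          stepB_eq, coreA_cons d c rest hd hr]
      simp only [List.flatMap_map, List.map_flatMap]
      apply List.flatMap_congr
      intro ele hele
      have hl : find_Hamming_distance ele rest = hm ele rest := ham_eq _ _ (lenA d rest ele hele)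
      rw [hl]
      by_cases hlt : hm ele rest < d
      · simp only [hlt, if_true, List.map_map]
        apply List.map_congr_left
        intro b _
        simp only [Function.comp_def, hm_cons]
        by_cases hbc : b = c
        · simp [hbc]
        · simp [hbc]; omega
      · simp [hlt, hm_cons]

-- ===== VERDICT (by name: the statement is the Claim_ definition above) =====
theorem create_neighbors_spec : Claim_equal_create_neighbors := by
  intro pattern d _ hpre
  obtain ⟨hne, hd⟩ := hpre
  have hlist : pattern.toList ≠ [] := by
    intro hc
    apply hne
    have := congrArg String.ofList hc
    simpa using this
  unfold Spec_create_neighbors create_neighbors create_neighbors_alt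
  by_cases h1 : pattern.toList.length = 1
  · rw [create_neighbors_core.eq_def]
    simp [hd, h1]
  · rcases hc : pattern.toList with _ | ⟨c, rest⟩
    · exact absurd hc hlist
    · have h1' : ¬ ((c :: rest).length = 1) := hc ▸ h1
      simp only [hd, if_false, if_neg h1']
      rw [mainB d hd (c :: rest) (by simp)]
      simp [List.map_map, Function.comp_def]
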